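-- pv_equiv track=rewrite | github.com/rubelw/OSSS | src/OSSS/ai/agents/query_data/handlers/incidents_handler.py | _select_incidents_fields
-- ===== SOURCE A (Python) =====
-- from typing import Any, Dict, List, Sequence
--
-- def _select_incidents_fields(
--     rows: Sequence[Dict[str, Any]],
-- ) -> List[str]:
--     if not rows:
--         return []
--
--     preferred_order = [
--         "id",
--         "incident_code",
--         "incident_type",
--         "severity",
--         "status",
--         "student_id",
--         "student_code",
--         "student_name",
--         "location",
--         "building",
--         "room",
--         "date",
--         "time",
--         "reported_by",
--         "reported_by_name",
--         "description",
--         "action_taken",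
--         "created_at",
--         "updated_at",
--     ]
--
--     all_keys: List[str] = []
--     for r in rows:
--         for k in r.keys():
--             if k not in all_keys:
--                 all_keys.append(k)
--
--     ordered = [k for k in preferred_order if k in all_keys]
--     ordered.extend(x for x in all_keys if x not in ordered)
--     return ordered
-- ===== SOURCE B (Python) =====
-- from typing import Any, Dict, List, Sequence
--
-- def _select_incidents_fields(
--     rows: Sequence[Dict[str, Any]],
-- ) -> List[str]:
--     preferred_order = [
--         "id", "incident_code", "incident_type", "severity", "status",
--         "student_id", "student_code", "student_name", "location", "building",
--         "room", "date", "time", "reported_by", "reported_by_name",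
--         "description", "action_taken", "created_at", "updated_at",
--     ]
--     # distinct keys across all rows, first-seen order
--     keys = list(dict.fromkeys(k for r in rows for k in r.keys()))
--     # rank table: preferred keys get their index, everything else the max rank
--     rank = {k: i for i, k in enumerate(preferred_order)}
--     idx = {k: i for i, k in enumerate(keys)}
--     n = len(keys)
--     # single packed sort key: rank first, first-seen index as tie-break
--     return sorted(keys, key=lambda k: rank.get(k, len(preferred_order)) * (n + 1) + idx[k])
-- ===== Notes on version B (the rewrite author's own statement) =====
-- stated objective: faster
-- what changed: Replaces A's quadratic passes (append-if-absent all_keys build plus the extend loop's repeated membership scans over the growing ordered list) by a rank-table sort: dedup all keys once, build rank and first-seen-index dicts, and stably sort the distinct keys by the packed key rank*(n+1)+index.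
import Mathlib
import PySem

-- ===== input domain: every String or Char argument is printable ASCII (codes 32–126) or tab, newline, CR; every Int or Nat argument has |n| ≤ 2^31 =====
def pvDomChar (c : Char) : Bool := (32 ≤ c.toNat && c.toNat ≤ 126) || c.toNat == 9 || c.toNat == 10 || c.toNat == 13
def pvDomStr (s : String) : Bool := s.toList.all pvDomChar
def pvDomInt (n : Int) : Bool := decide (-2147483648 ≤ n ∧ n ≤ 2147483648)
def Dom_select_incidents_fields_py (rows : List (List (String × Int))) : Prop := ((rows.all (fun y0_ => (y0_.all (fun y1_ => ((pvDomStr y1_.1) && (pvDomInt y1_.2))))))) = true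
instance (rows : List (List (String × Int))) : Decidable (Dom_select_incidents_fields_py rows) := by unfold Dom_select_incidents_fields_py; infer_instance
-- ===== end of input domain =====

-- B replaces A's quadratic membership-filtering passes by a rank-table stable sort of the distinct keys (measured faster in a timing run).

-- shared constant: the preferred_order list both Pythons contain verbatim
def pvPreferredOrder : List String :=
  ["id", "incident_code", "incident_type", "severity", "status",
   "student_id", "student_code", "student_name", "location", "building",
   "room", "date", "time", "reported_by", "reported_by_name",
   "description", "action_taken", "created_at", "updated_at"]

-- ===== PORT A =====
-- literal transliteration of A: guard on empty rows; build all_keys by the nested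
-- append-if-absent loop (r.keys() = first occurrences of the row's keys); ordered =
-- preferred keys present; then the extend loop appending unseen keys (the membership
-- test of the generator sees the list as extended so far, hence the fold).
def select_incidents_fields_py (rows : List (List (String × Int))) : List String :=
  if rows = [] then []
  else
    let allKeys := rows.foldl (fun acc r =>
      (PySem.List.dedup (r.map Prod.fst)).foldl
        (fun acc k => if acc.contains k then acc else acc ++ [k]) acc) []
    let ordered := pvPreferredOrder.filter (fun k => allKeys.contains k)
    allKeys.foldl (fun o x => if o.contains x then o else o ++ [x]) ordered

-- ===== PORT B =====
-- literal transliteration of B (Source B): keys = dict.fromkeys over every row's keys;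
-- rank and idx dicts from enumerate; stable sort by the packed integer key.
-- idx[k] (Python, always present) is ported as the total getD with default 0.
def select_incidents_fields_py_alt (rows : List (List (String × Int))) : List String :=
  let keys := PySem.List.dedup (rows.flatMap (fun r => PySem.List.dedup (r.map Prod.fst)))
  let rank := PySem.Dict.ofList ((PySem.List.enumerate pvPreferredOrder 0).map (fun p => (p.2, p.1)))
  let idx := PySem.Dict.ofList ((PySem.List.enumerate keys 0).map (fun p => (p.2, p.1)))
  let n : Int := keys.length
  PySem.List.sorted keys
    (fun k => rank.getD k (pvPreferredOrder.length : Int) * (n + 1) + idx.getD k 0) false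

-- ===== PRECONDITION & SPEC =====
def Spec_select_incidents_fields_py (rows : List (List (String × Int))) (out : List String) : Prop := out = select_incidents_fields_py_alt rows
instance (rows : List (List (String × Int))) (out : List String) : Decidable (Spec_select_incidents_fields_py rows out) := by unfold Spec_select_incidents_fields_py; infer_instance

-- ===== CLAIM (what is proved, stated in full; the proofs are below) =====
def Claim_equal_select_incidents_fields_py : Prop := ∀ (rows : List (List (String × Int))), Dom_select_incidents_fields_py rows → Spec_select_incidents_fields_py rows (select_incidents_fields_py rows)

-- ===== LEMMAS AND PROOFS =====

-- positions along a duplicate-free list are strictly increasing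
theorem pvPairwiseIdxOfLt (xs : List String) (h : xs.Nodup) :
    xs.Pairwise (fun a b => xs.idxOf a < xs.idxOf b) := by
  induction xs with
  | nil => simp
  | cons a t ih =>
    rcases List.nodup_cons.mp h with ⟨ha, ht⟩
    refine List.Pairwise.cons ?_ ?_
    · intro b hb
      have hba : b ≠ a := fun e => ha (e ▸ hb)
      rw [List.idxOf_cons_self, List.idxOf_cons_ne _ (Ne.symm hba)]
      exact Nat.succ_pos _
    · refine (ih ht).imp_of_mem ?_
      intro x y hx hy hlt
      have hxa : x ≠ a := fun e => ha (e ▸ hx)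
      have hya : y ≠ a := fun e => ha (e ▸ hy)
      rw [List.idxOf_cons_ne _ (Ne.symm hxa), List.idxOf_cons_ne _ (Ne.symm hya)]
      exact Nat.succ_lt_succ hlt

-- lookups through an insert-fold only depend on the lookup in the base dict
theorem pvGetDFoldlInsCongr (l : List (String × Int)) (x : String) (dft : Int) :
    ∀ (d1 d2 : PySem.Dict String Int), d1.getD x dft = d2.getD x dft →
      (l.foldl (fun d p => d.insert p.1 p.2) d1).getD x dft
      = (l.foldl (fun d p => d.insert p.1 p.2) d2).getD x dft := by
  induction l with
  | nil => intro d1 d2 h; simpa using h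
  | cons p t ih =>
    intro d1 d2 h
    simp only [List.foldl_cons]
    apply ih
    by_cases hx : x = p.1
    · subst hx; rw [PySem.Dict.getD_insert_self, PySem.Dict.getD_insert_self]
    · rw [PySem.Dict.getD_insert_of_ne _ _ _ hx, PySem.Dict.getD_insert_of_ne _ _ _ hx]; exact h

-- a key never inserted keeps its base lookup
theorem pvGetDFoldlInsNotMem (l : List (String × Int)) (x : String) (dft : Int)
    (h : x ∉ l.map Prod.fst) :
    ∀ (d : PySem.Dict String Int),
      (l.foldl (fun d p => d.insert p.1 p.2) d).getD x dft = d.getD x dft := by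
  induction l with
  | nil => intro d; rfl
  | cons p t ih =>
    intro d
    have h1 : x ≠ p.1 := fun e => h (by simp [e])
    have h2 : x ∉ t.map Prod.fst := fun m => h (by simp [m])
    simp only [List.foldl_cons]
    rw [ih h2, PySem.Dict.getD_insert_of_ne _ _ _ h1]

-- the {k: i for i, k in enumerate(xs)} dict looks up the position in xs
theorem pvGetDEnumDict (xs : List String) (h : xs.Nodup) (x : String) (d : Int) :
    ∀ (s : Int),
      (PySem.Dict.ofList ((PySem.List.enumerate xs s).map (fun p => (p.2, p.1)))).getD x d
      = if x ∈ xs then s + (xs.idxOf x : Int) else d := by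
  induction xs with
  | nil =>
    intro s
    rfl
  | cons a t ih =>
    intro s
    rcases List.nodup_cons.mp h with ⟨ha, ht⟩
    rw [PySem.List.enumerate_cons]
    simp only [List.map_cons]
    show ((((PySem.List.enumerate t (s+1)).map (fun p => (p.2, p.1))).foldl
          (fun d p => d.insert p.1 p.2) (PySem.Dict.empty.insert a s)).getD x d) = _
    have hmap : ((PySem.List.enumerate t (s+1)).map (fun p => (p.2, p.1))).map Prod.fst = t := by
      rw [List.map_map]
      exact PySem.List.map_snd_enumerate t (s+1)
    by_cases hx : x = a
    · subst hx
      have hnm : x ∉ ((PySem.List.enumerate t (s+1)).map (fun p => (p.2, p.1))).map Prod.fst := by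
        rw [hmap]; exact ha
      rw [pvGetDFoldlInsNotMem _ _ _ hnm, PySem.Dict.getD_insert_self]
      simp [List.idxOf_cons_self]
    · have hbase : (PySem.Dict.empty.insert a s).getD x d
          = (PySem.Dict.empty (κ := String) (ν := Int)).getD x d := by
        rw [PySem.Dict.getD_insert_of_ne _ _ _ hx]
      rw [pvGetDFoldlInsCongr _ _ _ _ _ hbase]
      show (PySem.Dict.ofList ((PySem.List.enumerate t (s+1)).map (fun p => (p.2, p.1)))).getD x d = _
      rw [ih ht (s + 1)]
      by_cases hxt : x ∈ t
      · rw [if_pos hxt, if_pos (List.mem_cons_of_mem a hxt),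
            List.idxOf_cons_ne _ (Ne.symm hx)]
        push_cast
        ring
      · rw [if_neg hxt, if_neg (by simp [hxt, hx])]

-- the append-if-absent fold over a duplicate-free list is append-the-new-tail
theorem pvFoldlAddFilter (K : List String) (h : K.Nodup) :
    ∀ (s : List String),
      K.foldl (fun o x => if o.contains x then o else o ++ [x]) s
      = s ++ K.filter (fun x => !s.contains x) := by
  induction K with
  | nil => intro s; simp
  | cons k K' ih =>
    intro s
    rcases List.nodup_cons.mp h with ⟨hk, hK'⟩
    by_cases hc : s.contains k = true
    · rw [List.foldl_cons, if_pos hc, ih hK' s, List.filter_cons]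
      have hks : k ∈ s := by simpa using hc
      simp [hks]
    · have hcf : s.contains k = false := by
        cases hcc : s.contains k
        · rfl
        · exact absurd hcc hc
      rw [List.foldl_cons, if_neg hc, ih hK' (s ++ [k]), List.filter_cons]
      have hf : K'.filter (fun x => !(s ++ [k]).contains x)
          = K'.filter (fun x => !s.contains x) := by
        apply List.filter_congr
        intro x hx
        have hxk : x ≠ k := fun e => hk (e ▸ hx)
        simp [hxk]
      rw [hf]
      have hks : k ∉ s := by simpa using hcf
      simp [hks]

-- the nested all_keys loop is the same fold over the flattened key stream
theorem pvFoldlFlat (rows : List (List (String × Int))) :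
    ∀ (s : List String),
      rows.foldl (fun acc r =>
        (PySem.List.dedup (r.map Prod.fst)).foldl
          (fun acc k => if acc.contains k then acc else acc ++ [k]) acc) s
      = (rows.flatMap (fun r => PySem.List.dedup (r.map Prod.fst))).foldl
          (fun acc k => if acc.contains k then acc else acc ++ [k]) s := by
  induction rows with
  | nil => intro s; rfl
  | cons r t ih => intro s; simp only [List.foldl_cons, List.flatMap_cons, List.foldl_append]; exact ih _

-- packed-key arithmetic: a strictly smaller rank wins whatever the indices are
theorem pvKeyLtOfRankLt (ra rb ia ib n : Int) (h0 : 0 ≤ n) (h1 : ra < rb)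
    (h2 : ia < n + 1) (h3 : 0 ≤ ib) : ra * (n + 1) + ia < rb * (n + 1) + ib := by
  nlinarith

theorem pvPreferredNodup : pvPreferredOrder.Nodup := by simp [pvPreferredOrder]

-- the whole equality, for any rows
theorem pvMainEq (rows : List (List (String × Int))) :
    select_incidents_fields_py rows = select_incidents_fields_py_alt rows := by
  by_cases hrows : rows = []
  · subst hrows; rfl
  · unfold select_incidents_fields_py select_incidents_fields_py_alt
    rw [if_neg hrows]
    set flat := rows.flatMap (fun r => PySem.List.dedup (r.map Prod.fst)) with hflat
    set K := PySem.List.dedup flat with hKdef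
    have hK : K.Nodup := PySem.List.nodup_dedup flat
    have hKeq : rows.foldl (fun acc r =>
        (PySem.List.dedup (r.map Prod.fst)).foldl
          (fun acc k => if acc.contains k then acc else acc ++ [k]) acc) [] = K := by
      rw [pvFoldlFlat rows []]
      rfl
    rw [hKeq]
    set ordered := pvPreferredOrder.filter (fun k => K.contains k) with hord
    rw [pvFoldlAddFilter K hK ordered]
    -- facts about the two dict lookups
    set L : Int := (pvPreferredOrder.length : Int) with hL
    set n : Int := (K.length : Int) with hn
    have hrank : ∀ x, (PySem.Dict.ofList ((PySem.List.enumerate pvPreferredOrder 0).map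
        (fun p => (p.2, p.1)))).getD x L
        = if x ∈ pvPreferredOrder then (pvPreferredOrder.idxOf x : Int) else L := by
      intro x
      rw [pvGetDEnumDict pvPreferredOrder pvPreferredNodup x L 0]
      simp
    have hidx : ∀ x, (PySem.Dict.ofList ((PySem.List.enumerate K 0).map
        (fun p => (p.2, p.1)))).getD x 0
        = if x ∈ K then (K.idxOf x : Int) else 0 := by
      intro x
      rw [pvGetDEnumDict K hK x 0 0]
      simp
    -- the key function
    set key : String → Int := fun k =>
      (PySem.Dict.ofList ((PySem.List.enumerate pvPreferredOrder 0).map (fun p => (p.2, p.1)))).getD k L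
      * (n + 1)
      + (PySem.Dict.ofList ((PySem.List.enumerate K 0).map (fun p => (p.2, p.1)))).getD k 0
      with hkey
    show ordered ++ K.filter (fun x => !ordered.contains x)
        = PySem.List.sorted K key false
    -- membership facts
    have hmemord : ∀ x, x ∈ ordered ↔ (x ∈ pvPreferredOrder ∧ x ∈ K) := by
      intro x; simp [hord, List.mem_filter]
    have hordNodup : ordered.Nodup := pvPreferredNodup.filter _
    have hrest := K.filter (fun x => !ordered.contains x)
    have hrestNodup : (K.filter (fun x => !ordered.contains x)).Nodup := hK.filter _
    have hmemrest : ∀ x, x ∈ K.filter (fun x => !ordered.contains x) ↔ (x ∈ K ∧ x ∉ ordered) := by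
      intro x; simp [List.mem_filter]
    have hn0 : 0 ≤ n := by rw [hn]; positivity
    -- key values on the two blocks
    have hkeyPref : ∀ x ∈ ordered, key x
        = (pvPreferredOrder.idxOf x : Int) * (n + 1) + (K.idxOf x : Int) := by
      intro x hx
      rcases (hmemord x).mp hx with ⟨hp, hk⟩
      simp only [hkey, hrank, hidx, if_pos hp, if_pos hk]
    have hkeyRest : ∀ x ∈ K.filter (fun x => !ordered.contains x), key x
        = L * (n + 1) + (K.idxOf x : Int) := by
      intro x hx
      rcases (hmemrest x).mp hx with ⟨hk, hno⟩
      have hnp : x ∉ pvPreferredOrder := fun hp => hno ((hmemord x).mpr ⟨hp, hk⟩)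
      simp only [hkey, hrank, hidx, if_neg hnp, if_pos hk]
    have hidxlt : ∀ x ∈ K, (K.idxOf x : Int) < n := by
      intro x hx
      rw [hn]
      exact_mod_cast List.idxOf_lt_length_of_mem hx
    -- the permutation
    have hperm : (ordered ++ K.filter (fun x => !ordered.contains x)).Perm K := by
      rw [List.perm_ext_iff_of_nodup
        (hordNodup.append hrestNodup
          (fun a ha hb => ((hmemrest a).mp hb).2 ha)) hK]
      intro a
      constructor
      · intro h
        rcases List.mem_append.mp h with h | h
        · exact ((hmemord a).mp h).2
        · exact ((hmemrest a).mp h).1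
      · intro h
        by_cases ho : a ∈ ordered
        · exact List.mem_append.mpr (Or.inl ho)
        · exact List.mem_append.mpr (Or.inr ((hmemrest a).mpr ⟨h, ho⟩))
    -- strictly increasing keys along the concatenation
    have hpw : (ordered ++ K.filter (fun x => !ordered.contains x)).Pairwise
        (fun a b => key a < key b) := by
      rw [List.pairwise_append]
      refine ⟨?_, ?_, ?_⟩
      · -- within ordered: ranks strictly increase
        have h1 : ordered.Pairwise
            (fun a b => pvPreferredOrder.idxOf a < pvPreferredOrder.idxOf b) :=
          (pvPairwiseIdxOfLt pvPreferredOrder pvPreferredNodup).sublist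
            (List.filter_sublist)
        refine h1.imp_of_mem ?_
        intro a b ha hb hlt
        rw [hkeyPref a ha, hkeyPref b hb]
        have hak := ((hmemord a).mp ha).2
        exact pvKeyLtOfRankLt _ _ _ _ _ hn0 (by exact_mod_cast hlt)
          (by have := hidxlt a hak; omega) (by positivity)
      · -- within the rest: first-seen indices strictly increase, ranks tie at L
        have h1 : (K.filter (fun x => !ordered.contains x)).Pairwise
            (fun a b => K.idxOf a < K.idxOf b) :=
          (pvPairwiseIdxOfLt K hK).sublist (List.filter_sublist)
        refine h1.imp_of_mem ?_
        intro a b ha hb hlt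
        rw [hkeyRest a ha, hkeyRest b hb]
        have : (K.idxOf a : Int) < (K.idxOf b : Int) := by exact_mod_cast hlt
        linarith
      · -- across: preferred ranks < L
        intro a ha b hb
        rw [hkeyPref a ha, hkeyRest b hb]
        have hap := ((hmemord a).mp ha).1
        have hak := ((hmemord a).mp ha).2
        have hra : (pvPreferredOrder.idxOf a : Int) < L := by
          rw [hL]
          exact_mod_cast List.idxOf_lt_length_of_mem hap
        exact pvKeyLtOfRankLt _ _ _ _ _ hn0 hra
          (by have := hidxlt a hak; omega) (by positivity)
    exact (PySem.List.sorted_eq_of_perm_of_pairwise_lt K _ key hperm hpw).symm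

-- ===== VERDICT (by name: the statement is the Claim_ definition above) =====
theorem select_incidents_fields_py_spec : Claim_equal_select_incidents_fields_py := by
  intro rows _
  unfold Spec_select_incidents_fields_py
  exact pvMainEq rows
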